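-- pv_equiv track=rewrite | github.com/APrioriInvestments/typed_python | typed_python/compiler/type_wrappers/set_wrapper.py | set_subset_iterable
-- ===== SOURCE A (Python) =====
-- def set_subset_iterable(left, right):
--     if len(left) == 0:
--         return True
--     shadow = type(left)()
--     for i in right:
--         if i in left:
--             shadow.add(i)
--             if len(shadow) == len(left):
--                 return True
--     return False
-- ===== SOURCE B (Python) =====
-- def set_subset_iterable(left, right):
--     rightset = set(right)
--     return all(x in rightset for x in left)
-- ===== Notes on version B (the rewrite author's own statement) =====
-- stated objective: idiomatic
-- what changed: B builds a set of the right iterable once and checks every element of left against it (all(x in rightset for x in left)), instead of scanning right and accumulating a shadow set of matched elements until it reaches left's size.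
import Mathlib
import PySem

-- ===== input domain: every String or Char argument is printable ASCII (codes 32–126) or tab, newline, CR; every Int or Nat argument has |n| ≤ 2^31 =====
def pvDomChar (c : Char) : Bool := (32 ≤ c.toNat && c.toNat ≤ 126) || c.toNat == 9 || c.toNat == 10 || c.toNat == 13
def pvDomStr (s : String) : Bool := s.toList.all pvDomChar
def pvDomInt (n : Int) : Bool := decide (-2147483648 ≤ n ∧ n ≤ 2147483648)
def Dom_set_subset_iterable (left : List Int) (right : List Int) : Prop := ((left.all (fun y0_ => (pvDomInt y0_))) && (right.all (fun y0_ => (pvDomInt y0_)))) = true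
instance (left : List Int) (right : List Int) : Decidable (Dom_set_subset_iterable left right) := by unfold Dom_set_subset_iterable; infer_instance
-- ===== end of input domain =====

-- B inverts the traversal: it builds set(right) once and tests each element of left against it,
-- instead of A's scan of right that grows a shadow set of matched elements until it reaches left's size.

-- ===== PORT A =====
-- the 'for i in right' loop with early return; shadow is the growing set of matched elements
def setSubsetLoopA (left : List Int) : List Int → PySem.Set Int → Bool
  | [], _ => false
  | i :: rest, shadow =>
    if left.contains i then
      let shadow' := PySem.Set.add shadow i
      if shadow'.length = left.length then true
      else setSubsetLoopA left rest shadow'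
    else setSubsetLoopA left rest shadow

def set_subset_iterable (left : List Int) (right : List Int) : Bool :=
  if left.length = 0 then true
  else setSubsetLoopA left right PySem.Set.empty

-- ===== PORT B =====
def set_subset_iterable_alt (left : List Int) (right : List Int) : Bool :=
  let rightset := PySem.Set.ofList right
  left.all (fun x => PySem.Set.contains rightset x)

-- ===== PRECONDITION & SPEC =====
-- left is a Python set, so its List Int representation holds the DISTINCT elements:
-- Pre_ only states that representation invariant (no duplicates in left); right is unrestricted.
def Pre_set_subset_iterable (left : List Int) (right : List Int) : Prop := left.Nodup
instance (left : List Int) (right : List Int) : Decidable (Pre_set_subset_iterable left right) := by unfold Pre_set_subset_iterable; infer_instance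
def pvWitness_set_subset_iterable : List Int × List Int := ([1, 3], [3, 2, 1])

def Spec_set_subset_iterable (left : List Int) (right : List Int) (out : Bool) : Prop := out = set_subset_iterable_alt left right
instance (left : List Int) (right : List Int) (out : Bool) : Decidable (Spec_set_subset_iterable left right out) := by unfold Spec_set_subset_iterable; infer_instance

-- ===== CLAIM (what is proved, stated in full; the proofs are below) =====
def Claim_equal_set_subset_iterable : Prop := ∀ (left : List Int) (right : List Int), Dom_set_subset_iterable left right → Pre_set_subset_iterable left right → Spec_set_subset_iterable left right (set_subset_iterable left right)

-- ===== LEMMAS AND PROOFS =====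

-- loop invariant: shadow is a nodup subcollection of left that is still strictly smaller than left;
-- the loop returns true iff every element of left is already in shadow or still ahead in the iterable
theorem setSubsetLoopA_true_iff (left : List Int) (rest : List Int) (shadow : PySem.Set Int)
    (hl : left.Nodup) (hs : shadow.Nodup) (hsub : ∀ x ∈ shadow, x ∈ left)
    (hlt : shadow.length < left.length) :
    setSubsetLoopA left rest shadow = true ↔ ∀ x ∈ left, x ∈ shadow ∨ x ∈ rest := by
  induction rest generalizing shadow with
  | nil =>
    simp only [setSubsetLoopA, List.not_mem_nil, or_false]
    constructor
    · intro h; cases h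
    · intro h
      exfalso
      have h1 : left.length ≤ shadow.length := by
        have : left.toFinset ⊆ shadow.toFinset := by
          intro x hx
          simp only [List.mem_toFinset] at hx ⊢
          exact h x hx
        have hc := Finset.card_le_card this
        rwa [List.toFinset_card_of_nodup hl, List.toFinset_card_of_nodup hs] at hc
      omega
  | cons i rest ih =>
    simp only [setSubsetLoopA]
    by_cases hmem : i ∈ left
    · simp only [List.contains_iff_mem.mpr hmem, if_true]
      have hs' : (PySem.Set.add shadow i).Nodup := PySem.Set.nodup_add shadow i hs
      have hsub' : ∀ x ∈ PySem.Set.add shadow i, x ∈ left := by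
        intro x hx
        rcases (PySem.Set.mem_add _ _ _).mp hx with h | h
        · exact hsub x h
        · exact h ▸ hmem
      by_cases hfull : (PySem.Set.add shadow i).length = left.length
      · simp only [hfull, if_true, true_iff]
        -- the enlarged shadow has left's size, so (nodup, ⊆ left) it contains all of left
        have hset : (PySem.Set.add shadow i).toFinset = left.toFinset := by
          apply Finset.eq_of_subset_of_card_le
          · intro x hx
            simp only [List.mem_toFinset] at hx ⊢
            exact hsub' x hx
          · rw [List.toFinset_card_of_nodup hl, List.toFinset_card_of_nodup hs', hfull]
        intro x hx
        have : x ∈ PySem.Set.add shadow i := by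
          have := hset ▸ (List.mem_toFinset.mpr hx)
          exact List.mem_toFinset.mp this
        rcases (PySem.Set.mem_add _ _ _).mp this with h | h
        · exact Or.inl h
        · exact Or.inr (by simp [h])
      · simp only [hfull, if_false]
        have hlt' : (PySem.Set.add shadow i).length < left.length := by
          have : (PySem.Set.add shadow i).toFinset.card ≤ left.toFinset.card :=
            Finset.card_le_card (by intro x hx; simp only [List.mem_toFinset] at hx ⊢; exact hsub' x hx)
          rw [List.toFinset_card_of_nodup hl, List.toFinset_card_of_nodup hs'] at this
          omega
        rw [ih _ hs' hsub' hlt']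
        constructor
        · intro h x hx
          rcases h x hx with h1 | h1
          · rcases (PySem.Set.mem_add _ _ _).mp h1 with h2 | h2
            · exact Or.inl h2
            · exact Or.inr (by simp [h2])
          · exact Or.inr (List.mem_cons_of_mem _ h1)
        · intro h x hx
          rcases h x hx with h1 | h1
          · exact Or.inl ((PySem.Set.mem_add _ _ _).mpr (Or.inl h1))
          · rcases List.mem_cons.mp h1 with h2 | h2
            · exact Or.inl ((PySem.Set.mem_add _ _ _).mpr (Or.inr h2))
            · exact Or.inr h2
    · rw [if_neg (by simpa using hmem), ih _ hs hsub hlt]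
      constructor
      · intro h x hx
        rcases h x hx with h1 | h1
        · exact Or.inl h1
        · exact Or.inr (List.mem_cons_of_mem _ h1)
      · intro h x hx
        rcases h x hx with h1 | h1
        · exact Or.inl h1
        · rcases List.mem_cons.mp h1 with h2 | h2
          · exact absurd (h2 ▸ hx) hmem
          · exact Or.inr h2

theorem alt_true_iff (left right : List Int) :
    set_subset_iterable_alt left right = true ↔ ∀ x ∈ left, x ∈ right := by
  simp [set_subset_iterable_alt, List.all_eq_true, PySem.Set.contains_eq_listContains,
        PySem.Set.mem_ofList]

-- ===== VERDICT (by name: the statement is the Claim_ definition above) =====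
theorem set_subset_iterable_spec : Claim_equal_set_subset_iterable := by
  intro left right _ hpre
  unfold Spec_set_subset_iterable set_subset_iterable
  by_cases hnil : left.length = 0
  · have : left = [] := List.length_eq_zero_iff.mp hnil
    subst this
    simp [set_subset_iterable_alt]
  · rw [if_neg hnil]
    rw [Bool.eq_iff_iff]
    rw [setSubsetLoopA_true_iff left right PySem.Set.empty hpre List.nodup_nil
          (by intro x hx; cases hx) (by simpa [PySem.Set.empty] using Nat.pos_of_ne_zero hnil)]
    rw [alt_true_iff]
    constructor
    · intro h x hx
      rcases h x hx with h1 | h1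
      · cases h1
      · exact h1
    · intro h x hx; exact Or.inr (h x hx)
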